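-- pv_equiv track=rewrite | github.com/dillonp23/CSPT19_Sprint_2 | sprint_challenge.py | checkBlanagrams
-- ===== SOURCE A (Python) =====
-- def checkBlanagrams(word1, word2):
--     if len(word1) != len(word2):
--         return False
--
--     list_1 = []
--     count = 0
--
--     for letter in word1:
--         list_1.append(letter)
--
--     for letter in word2:
--         try:
--             list_1.remove(letter)
--         except:
--             count += 1
--
--
--     return count == 1
-- ===== SOURCE B (Python) =====
-- def checkBlanagrams(word1, word2):
--     if len(word1) != len(word2):
--         return False
--     w1 = list(word1)
--     w2 = list(word2)
--     extra = 0
--     for ch in set(w2):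
--         d = w2.count(ch) - w1.count(ch)
--         if d > 0:
--             extra += d
--     return extra == 1
-- ===== Notes on version B (the rewrite author's own statement) =====
-- stated objective: faster
-- what changed: Replaced the per-letter list.remove loop (linear scan + shift per letter) with a single pass over the distinct letters of word2, summing the positive surpluses of word2's letter counts over word1's.
import Mathlib
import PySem

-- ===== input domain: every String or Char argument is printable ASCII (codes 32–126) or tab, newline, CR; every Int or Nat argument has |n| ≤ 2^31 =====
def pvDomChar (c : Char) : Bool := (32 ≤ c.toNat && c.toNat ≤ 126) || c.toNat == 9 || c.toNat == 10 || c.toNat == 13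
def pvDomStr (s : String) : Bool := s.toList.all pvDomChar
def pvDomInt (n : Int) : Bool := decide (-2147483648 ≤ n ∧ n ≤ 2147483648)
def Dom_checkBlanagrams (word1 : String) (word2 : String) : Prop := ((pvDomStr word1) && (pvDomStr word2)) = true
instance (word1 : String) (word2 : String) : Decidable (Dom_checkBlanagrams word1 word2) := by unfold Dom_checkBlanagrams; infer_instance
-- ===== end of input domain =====

-- B replaces A's quadratic remove-one-letter-at-a-time loop by one pass over the
-- distinct letters of word2 summing positive count surpluses (faster by mechanism, same result).

-- ===== PORT A =====
def checkBlanagrams (word1 : String) (word2 : String) : Bool :=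
  if PySem.Str.len word1 ≠ PySem.Str.len word2 then false
  else
    -- list_1 built by appending each letter of word1; count incremented on failed remove
    let list1 : List Char := word1.toList.foldl (fun a c => a ++ [c]) []
    let st : List Char × Int := word2.toList.foldl
      (fun (st : List Char × Int) letter =>
        match PySem.List.remove? st.1 letter with
        | some l => (l, st.2)
        | none => (st.1, st.2 + 1)) (list1, 0)
    st.2 == 1

-- ===== PORT B =====
def checkBlanagrams_alt (word1 : String) (word2 : String) : Bool :=
  if PySem.Str.len word1 ≠ PySem.Str.len word2 then false
  else
    let w1 : List Char := word1.toList
    let w2 : List Char := word2.toList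
    -- sum over set(w2); the sum is independent of Python's set iteration order
    let extra : Int := (PySem.Set.ofList w2).foldl
      (fun acc ch =>
        let d : Int := (w2.count ch : Int) - (w1.count ch : Int)
        if d > 0 then acc + d else acc) 0
    extra == 1

-- ===== PRECONDITION & SPEC =====
def Spec_checkBlanagrams (word1 : String) (word2 : String) (out : Bool) : Prop := out = checkBlanagrams_alt word1 word2
instance (word1 : String) (word2 : String) (out : Bool) : Decidable (Spec_checkBlanagrams word1 word2 out) := by unfold Spec_checkBlanagrams; infer_instance

-- ===== CLAIM (what is proved, stated in full; the proofs are below) =====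
def Claim_equal_checkBlanagrams : Prop := ∀ (word1 : String) (word2 : String), Dom_checkBlanagrams word1 word2 → Spec_checkBlanagrams word1 word2 (checkBlanagrams word1 word2)

-- ===== LEMMAS AND PROOFS =====

-- number of letters of ys that fail to be removed from the multiset l (A's count)
def pvMiss (l : List Char) (ys : List Char) : Int :=
  match ys with
  | [] => 0
  | y :: ys =>
    match PySem.List.remove? l y with
    | some l' => pvMiss l' ys
    | none => 1 + pvMiss l ys

-- the positive surplus of ys's count of c over l's count of c (B's summand)
def pvSur (ys l : List Char) (c : Char) : Int :=
  if (ys.count c : Int) - (l.count c : Int) > 0 then (ys.count c : Int) - (l.count c : Int) else 0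

theorem pvFoldA_snd (ys : List Char) (l : List Char) (c : Int) :
    (ys.foldl (fun (st : List Char × Int) letter =>
        match PySem.List.remove? st.1 letter with
        | some l => (l, st.2)
        | none => (st.1, st.2 + 1)) (l, c)).2 = c + pvMiss l ys := by
  induction ys generalizing l c with
  | nil => simp [pvMiss]
  | cons y ys ih =>
    simp only [List.foldl_cons, pvMiss]
    cases h : PySem.List.remove? l y with
    | some l' => simp [ih]
    | none => simp [ih]; ring

theorem pvMiss_eq_sum (ys : List Char) (l : List Char) (S : List Char)
    (hS : S.Nodup) (hmem : ∀ c ∈ ys, c ∈ S) :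
    pvMiss l ys = (S.map (pvSur ys l)).sum := by
  induction ys generalizing l with
  | nil =>
    have hz : ∀ c ∈ S, pvSur [] l c = 0 := by
      intro c _
      simp only [pvSur, List.count_nil]
      split_ifs with h
      · omega
      · rfl
    rw [List.map_congr_left hz]
    simp [pvMiss]
  | cons y ys ih =>
    have hys : ∀ c ∈ ys, c ∈ S := fun c hc => hmem c (List.mem_cons_of_mem _ hc)
    have hyS : y ∈ S := hmem y (List.mem_cons_self)
    simp only [pvMiss]
    cases hrem : PySem.List.remove? l y with
    | some l' =>
      have hyl : y ∈ l := by
        by_contra hn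
        rw [(PySem.List.remove?_eq_none_iff l y).mpr hn] at hrem; cases hrem
      have hl' : l' = l.erase y := by
        rw [PySem.List.remove?_eq_some_erase l y hyl] at hrem
        exact (Option.some.injEq _ _ ▸ hrem).symm
      subst hl'
      show pvMiss (l.erase y) ys = (S.map (pvSur (y :: ys) l)).sum
      rw [ih (l.erase y) hys]
      apply congrArg
      apply List.map_congr_left
      intro c _
      have hpos : 0 < l.count y := List.count_pos_iff.mpr hyl
      have hcy : (y :: ys).count c = ys.count c + (if c = y then 1 else 0) := by
        by_cases h : c = y
        · subst h; simp
        · simp [h, Ne.symm h]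
      have hce : (l.erase y).count c + (if c = y then 1 else 0) = l.count c := by
        by_cases h : c = y
        · subst h
          rw [List.count_erase_self]
          simp
          omega
        · rw [List.count_erase_of_ne h]
          simp [h]
      simp only [pvSur, hcy, ← hce]
      by_cases h : c = y <;> simp [h]
    | none =>
      have hyl : y ∉ l := (PySem.List.remove?_eq_none_iff l y).mp hrem
      have hcnt : l.count y = 0 := List.count_eq_zero.mpr hyl
      show 1 + pvMiss l ys = (S.map (pvSur (y :: ys) l)).sum
      rw [ih l hys]
      have hterm : ∀ c ∈ S, pvSur (y :: ys) l c = pvSur ys l c + (if (c == y) = true then (1:Int) else 0) := by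
        intro c _
        by_cases h : c = y
        · subst h
          simp only [pvSur, List.count_cons_self, hcnt, beq_self_eq_true, if_true]
          push_cast
          split_ifs <;> omega
        · have hne : ¬ ((c == y) = true) := by simp [h]
          simp [pvSur, List.count_cons_of_ne (fun hh => h hh.symm), hne]
      rw [List.map_congr_left hterm, PySem.List.sum_map_add_int,
          PySem.List.sum_map_ite_one_zero]
      have hcount : S.countP (fun c => c == y) = 1 := by
        have : S.countP (fun c => c == y) = S.count y := rfl
        rw [this, List.count_eq_one_of_mem hS hyS]
      rw [hcount]
      push_cast
      ring

-- ===== VERDICT (by name: the statement is the Claim_ definition above) =====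
theorem checkBlanagrams_spec : Claim_equal_checkBlanagrams := by
  intro word1 word2 _
  unfold Spec_checkBlanagrams checkBlanagrams checkBlanagrams_alt
  by_cases hlen : PySem.Str.len word1 ≠ PySem.Str.len word2
  · rw [if_pos hlen, if_pos hlen]
  · rw [if_neg hlen, if_neg hlen]
    have hbuild : word1.toList.foldl (fun (a : List Char) c => a ++ [c]) [] = word1.toList := by
      simpa using PySem.List.foldl_append_singleton_eq_map (fun c : Char => c) word1.toList []
    simp only [hbuild, pvFoldA_snd, zero_add]
    have hsum := pvMiss_eq_sum word2.toList word1.toList (PySem.Set.ofList word2.toList)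
      (PySem.Set.nodup_ofList _) (fun c hc => (PySem.Set.mem_ofList _ _).mpr hc)
    have hfun : (fun (acc : Int) ch =>
          let d : Int := (word2.toList.count ch : Int) - (word1.toList.count ch : Int)
          if d > 0 then acc + d else acc)
        = (fun (acc : Int) ch => acc + pvSur word2.toList word1.toList ch) := by
      funext acc ch
      simp only [pvSur]
      split_ifs <;> simp
    simp only [hfun, PySem.List.foldl_add, zero_add, hsum]
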